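-- pv_equiv track=rewrite | github.com/yuval-github/HW1 | data.py | filter_by_threshold
-- ===== SOURCE A (Python) =====
-- def filter_by_threshold(data, feature, threshold, is_above):
--     """returns two dictionaries, data1 contains the hours in which
--     the value of feature is above or below the threshold , depends
--     on the value of is_above , data2 is what ever is left in data"""
--     data1 = {}
--     data2 = {}
--     for key in data.keys():
--         data1[key] = []
--         data2[key] = []
--     for idx, val in enumerate(data[feature]):
--         for key in data.keys():
--             if (is_above and val > threshold) or ((not is_above) and val <= threshold):
--                 data1[key].append(data[key][idx])
--             else:
--                 data2[key].append(data[key][idx])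
--     return data1, data2
-- ===== SOURCE B (Python) =====
-- def filter_by_threshold(data, feature, threshold, is_above):
--     """Same result as A: one pass over the feature column builds two index
--     lists, then each output column is a projection of the input column."""
--     col = data[feature]
--     cond = (lambda v: v > threshold) if is_above else (lambda v: v <= threshold)
--     idx1 = [i for i, v in enumerate(col) if cond(v)]
--     idx2 = [i for i, v in enumerate(col) if not cond(v)]
--     data1 = {k: [vs[i] for i in idx1] for k, vs in data.items()}
--     data2 = {k: [vs[i] for i in idx2] for k, vs in data.items()}
--     return data1, data2
-- ===== Notes on version B (the rewrite author's own statement) =====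
-- stated objective: simpler
-- what changed: Replaces A's nested loop (re-testing the threshold for every key at every row) by one pass over the feature column building two index lists, then a per-column projection comprehension for each output dict.
import Mathlib
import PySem

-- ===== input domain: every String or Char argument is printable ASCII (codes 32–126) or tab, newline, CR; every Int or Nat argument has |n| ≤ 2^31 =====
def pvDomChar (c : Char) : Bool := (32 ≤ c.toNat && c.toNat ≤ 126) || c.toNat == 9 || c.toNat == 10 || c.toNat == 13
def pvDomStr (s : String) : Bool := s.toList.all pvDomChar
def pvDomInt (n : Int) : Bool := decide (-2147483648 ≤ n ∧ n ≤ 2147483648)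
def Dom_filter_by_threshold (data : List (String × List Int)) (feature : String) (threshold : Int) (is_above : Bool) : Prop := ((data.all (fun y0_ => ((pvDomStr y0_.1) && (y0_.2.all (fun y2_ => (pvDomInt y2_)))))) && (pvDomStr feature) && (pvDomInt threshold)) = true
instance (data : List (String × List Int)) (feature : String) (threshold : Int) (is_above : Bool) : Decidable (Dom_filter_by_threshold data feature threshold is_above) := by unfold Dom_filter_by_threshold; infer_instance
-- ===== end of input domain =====

-- ===== PORT A =====
-- B replaces A's nested per-key threshold test with one index-building pass plus per-column projections (objective: simpler; same return value).

-- dict assignment d[k] = v on an association list (overwrite first match in place, else append)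
def assocSet (d : List (String × List Int)) (k : String) (v : List Int) : List (String × List Int) :=
  if d.any (fun p => p.1 == k) then d.map (fun p => if p.1 == k then (k, v) else p) else d ++ [(k, v)]

-- d[k].append(x) on an association list (k present by construction in A)
def assocAppend (d : List (String × List Int)) (k : String) (x : Int) : List (String × List Int) :=
  d.map (fun p => if p.1 == k then (p.1, p.2 ++ [x]) else p)

def pyCond (is_above : Bool) (threshold v : Int) : Bool :=
  (is_above && decide (v > threshold)) || (!is_above && decide (v ≤ threshold))

def colOf (data : List (String × List Int)) (k : String) : List Int :=
  (data.lookup k).getD []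

def filter_by_threshold (data : List (String × List Int)) (feature : String) (threshold : Int) (is_above : Bool) : (List (String × List Int)) × (List (String × List Int)) :=
  let keys := PySem.Set.ofList (data.map Prod.fst)
  let init1 := keys.foldl (fun d k => assocSet d k []) []
  let init2 := keys.foldl (fun d k => assocSet d k []) []
  (PySem.List.enumerate (colOf data feature)).foldl
    (fun st iv =>
      keys.foldl
        (fun st k =>
          if pyCond is_above threshold iv.2 then
            (assocAppend st.1 k (PySem.List.pyGetD (colOf data k) iv.1 0), st.2)
          else
            (st.1, assocAppend st.2 k (PySem.List.pyGetD (colOf data k) iv.1 0)))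
        st)
    (init1, init2)

-- ===== PORT B =====
def filter_by_threshold_alt (data : List (String × List Int)) (feature : String) (threshold : Int) (is_above : Bool) : (List (String × List Int)) × (List (String × List Int)) :=
  let col := (data.lookup feature).getD []
  let cond := fun v => if is_above then decide (v > threshold) else decide (v ≤ threshold)
  let idx1 := ((PySem.List.enumerate col).filter (fun iv => cond iv.2)).map (fun iv => iv.1)
  let idx2 := ((PySem.List.enumerate col).filter (fun iv => !cond iv.2)).map (fun iv => iv.1)
  (data.map (fun p => (p.1, idx1.map (fun i => PySem.List.pyGetD p.2 i 0))),
   data.map (fun p => (p.1, idx2.map (fun i => PySem.List.pyGetD p.2 i 0))))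

-- ===== PRECONDITION & SPEC =====
-- Pre_ excludes association lists with duplicate keys (not representable as a Python dict, whose
-- construction collapses them), inputs where `feature` is not a key (A raises KeyError), and inputs
-- where some column is shorter than the feature column (A raises IndexError).
def Pre_filter_by_threshold (data : List (String × List Int)) (feature : String) (threshold : Int) (is_above : Bool) : Prop :=
  (data.map Prod.fst).Nodup ∧ feature ∈ data.map Prod.fst ∧
  ∀ p ∈ data, ((data.lookup feature).getD []).length ≤ p.2.length
instance (data : List (String × List Int)) (feature : String) (threshold : Int) (is_above : Bool) : Decidable (Pre_filter_by_threshold data feature threshold is_above) := by unfold Pre_filter_by_threshold; infer_instance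

def pvWitness_filter_by_threshold : (List (String × List Int)) × String × Int × Bool :=
  ([("a", [1, 5, 3]), ("b", [10, 20, 30])], "a", 2, true)

def Spec_filter_by_threshold (data : List (String × List Int)) (feature : String) (threshold : Int) (is_above : Bool) (out : (List (String × List Int)) × (List (String × List Int))) : Prop := out = filter_by_threshold_alt data feature threshold is_above
instance (data : List (String × List Int)) (feature : String) (threshold : Int) (is_above : Bool) (out : (List (String × List Int)) × (List (String × List Int))) : Decidable (Spec_filter_by_threshold data feature threshold is_above out) := by unfold Spec_filter_by_threshold; infer_instance

-- ===== CLAIM (what is proved, stated in full; the proofs are below) =====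
def Claim_equal_filter_by_threshold : Prop := ∀ (data : List (String × List Int)) (feature : String) (threshold : Int) (is_above : Bool), Dom_filter_by_threshold data feature threshold is_above → Pre_filter_by_threshold data feature threshold is_above → Spec_filter_by_threshold data feature threshold is_above (filter_by_threshold data feature threshold is_above)

-- ===== LEMMAS AND PROOFS =====

-- first-match lookup on a duplicate-free association list finds each member's own value
theorem lookup_mem_nodup (l : List (String × List Int)) (h : (l.map Prod.fst).Nodup) (p : String × List Int) (hp : p ∈ l) : l.lookup p.1 = some p.2 := by
  induction l with
  | nil => cases hp
  | cons q t ih =>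
    rw [List.map_cons, List.nodup_cons] at h
    rw [List.mem_cons] at hp
    rcases hp with he | hp
    · subst he; simp [List.lookup]
    · rw [List.lookup]
      have hne : (p.1 == q.1) = false :=
        beq_eq_false_iff_ne.mpr (fun e => h.1 (e ▸ List.mem_map_of_mem hp))
      rw [hne]; exact ih h.2 hp

-- inserting pairwise-distinct fresh keys into an association list just appends them
theorem foldl_assocSet_fresh (v : List Int) : ∀ (ks : List String) (acc : List (String × List Int)), ks.Nodup → (∀ k ∈ ks, ¬ k ∈ acc.map Prod.fst) → ks.foldl (fun d k => assocSet d k v) acc = acc ++ ks.map (fun k => (k, v))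
  | [], acc, _, _ => by simp
  | a :: ks, acc, hnd, hfresh => by
    rw [List.nodup_cons] at hnd
    have hnot : (acc.any (fun p => p.1 == a)) = false := by
      rw [List.any_eq_false]
      intro p hp e
      exact hfresh a List.mem_cons_self ((beq_iff_eq.mp e) ▸ List.mem_map_of_mem hp)
    rw [List.foldl_cons, assocSet, hnot, if_neg (by simp)]
    rw [foldl_assocSet_fresh v ks (acc ++ [(a, v)]) hnd.2 ?_]
    · simp
    · intro k hk
      simp only [List.map_append, List.mem_append]
      rintro (hin | hin)
      · exact hfresh k (List.mem_cons_of_mem _ hk) hin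
      · simp at hin
        exact hnd.1 (hin ▸ hk)

-- d[k].append(x) on a table of the shape ks.map (k, f k) updates the k-entry pointwise
theorem assocAppend_map (ks : List String) (f : String → List Int) (a : String) (x : Int) :
    assocAppend (ks.map (fun k => (k, f k))) a x
      = ks.map (fun k => (k, if k = a then f k ++ [x] else f k)) := by
  rw [assocAppend, List.map_map]
  refine List.map_congr_left (fun k _ => ?_)
  by_cases h : k = a <;> simp [h]

-- appending h k to every key's entry, one assocAppend per key
theorem foldl_assocAppend_all (ks : List String) (h : String → Int) : ∀ (ks' : List String) (f : String → List Int), ks'.Nodup → ks'.foldl (fun d k => assocAppend d k (h k)) (ks.map (fun k => (k, f k))) = ks.map (fun k => (k, if k ∈ ks' then f k ++ [h k] else f k))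
  | [], f, _ => by simp
  | a :: ks', f, hnd => by
    rw [List.nodup_cons] at hnd
    rw [List.foldl_cons, assocAppend_map ks f a (h a)]
    have : (ks.map (fun k => (k, if k = a then f k ++ [h a] else f k)))
        = ks.map (fun k => (k, (fun k => if k = a then f k ++ [h k] else f k) k)) := by
      refine List.map_congr_left (fun k _ => ?_)
      by_cases hk : k = a <;> simp [hk]
    rw [this, foldl_assocAppend_all ks h ks' _ hnd.2]
    refine List.map_congr_left (fun k _ => ?_)
    by_cases hk : k = a
    · subst hk
      simp [hnd.1]
    · by_cases hm : k ∈ ks' <;> simp [hk, hm]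

-- a fold over a pair state that only updates the first component
theorem foldl_pair_fst (F : List (String × List Int) → String → List (String × List Int)) : ∀ (ks : List String) (a b : List (String × List Int)), ks.foldl (fun st k => (F st.1 k, st.2)) (a, b) = (ks.foldl F a, b)
  | [], a, b => rfl
  | k :: ks, a, b => by rw [List.foldl_cons, List.foldl_cons]; exact foldl_pair_fst F ks (F a k) b

-- a fold over a pair state that only updates the second component
theorem foldl_pair_snd (F : List (String × List Int) → String → List (String × List Int)) : ∀ (ks : List String) (a b : List (String × List Int)), ks.foldl (fun st k => (st.1, F st.2 k)) (a, b) = (a, ks.foldl F b)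
  | [], a, b => rfl
  | k :: ks, a, b => by rw [List.foldl_cons, List.foldl_cons]; exact foldl_pair_snd F ks a (F b k)

-- the invariant of A's outer loop over the enumerated feature column
theorem main_loop (ks : List String) (hnd : ks.Nodup) (cond : Int → Bool) (g : String → Int → Int) : ∀ (l : List (Int × Int)) (f1 f2 : String → List Int),
    l.foldl
      (fun st iv =>
        ks.foldl
          (fun st k =>
            if cond iv.2 then (assocAppend st.1 k (g k iv.1), st.2)
            else (st.1, assocAppend st.2 k (g k iv.1)))
          st)
      (ks.map (fun k => (k, f1 k)), ks.map (fun k => (k, f2 k)))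
    = (ks.map (fun k => (k, f1 k ++ (l.filter (fun iv => cond iv.2)).map (fun iv => g k iv.1))),
       ks.map (fun k => (k, f2 k ++ (l.filter (fun iv => !cond iv.2)).map (fun iv => g k iv.1))))
  | [], f1, f2 => by simp
  | (i, v) :: l, f1, f2 => by
    rw [List.foldl_cons]
    have hall : ∀ f : String → List Int,
        ks.foldl (fun d k => assocAppend d k (g k i)) (ks.map (fun k => (k, f k)))
          = ks.map (fun k => (k, f k ++ [g k i])) := by
      intro f
      rw [foldl_assocAppend_all ks (fun k => g k i) ks f hnd]
      exact List.map_congr_left (fun k hk => by simp [hk])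
    by_cases hc : cond v
    · simp only [hc, if_true]
      rw [foldl_pair_fst (fun d k => assocAppend d k (g k i)) ks, hall f1,
        main_loop ks hnd cond g l (fun k => f1 k ++ [g k i]) f2]
      simp [hc, List.append_assoc]
    · simp only [hc, if_false, Bool.false_eq_true]
      rw [foldl_pair_snd (fun d k => assocAppend d k (g k i)) ks, hall f2,
        main_loop ks hnd cond g l f1 (fun k => f2 k ++ [g k i])]
      simp [hc, List.append_assoc]

-- ===== VERDICT (by name: the statement is the Claim_ definition above) =====
theorem filter_by_threshold_spec : Claim_equal_filter_by_threshold := by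
  intro data feature threshold is_above _hdom hpre
  obtain ⟨hnd, _hfeat, _hlen⟩ := hpre
  have hcond : ∀ v : Int, pyCond is_above threshold v
      = (if is_above then decide (v > threshold) else decide (v ≤ threshold)) := by
    intro v; cases is_above <;> simp [pyCond]
  simp only [Spec_filter_by_threshold, filter_by_threshold, filter_by_threshold_alt]
  rw [PySem.Set.ofList_eq_self_of_nodup _ hnd]
  have hinit := foldl_assocSet_fresh [] (data.map Prod.fst) [] hnd (by simp)
  rw [List.nil_append] at hinit
  rw [hinit, main_loop (data.map Prod.fst) hnd (pyCond is_above threshold)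
    (fun k i => PySem.List.pyGetD (colOf data k) i 0)
    (PySem.List.enumerate (colOf data feature)) (fun _ => []) (fun _ => [])]
  simp only [List.nil_append, List.map_map]
  refine Prod.ext ?_ ?_ <;>
  · refine List.map_congr_left (fun p hp => ?_)
    have hcol : colOf data p.1 = p.2 := by
      rw [colOf, lookup_mem_nodup data hnd p hp]; rfl
    simp only [Function.comp_def, hcol]
    refine congrArg (fun l => (p.1, l)) ?_
    simp only [colOf]
    refine congrArg _ ?_
    exact List.filter_congr (fun iv _ => by rw [hcond])
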